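-- pv_equiv track=rewrite | github.com/iop07695432/fastdbchkrep | src/fastdbchkrep/report/oracle/generator.py | _detect_columns_from_separator
-- ===== SOURCE A (Python) =====
-- def _detect_columns_from_separator(separator_line: str) -> list:
--     """
--     基于分隔线检测表格列的位置（更精确的方法）
--
--     Args:
--         separator_line: 分隔线（主要由-和空格组成）
--
--     Returns:
--         list: 列的起始位置列表
--     """
--     columns = [0]  # 第一列总是从位置0开始
--
--     # 找到每个-段落，段落之间的空格分隔标识新列开始
--     i = 0
--     while i < len(separator_line):
--         if separator_line[i] == '-':
--             # 跳过当前-段落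
--             while i < len(separator_line) and separator_line[i] == '-':
--                 i += 1
--             # 跳过段落后的空格
--             while i < len(separator_line) and separator_line[i] == ' ':
--                 i += 1
--             # 如果还有内容（下一个-段落），记录新列位置
--             if i < len(separator_line):
--                 columns.append(i)
--         else:
--             i += 1
--
--     return columns
-- ===== SOURCE B (Python) =====
-- def _detect_columns_from_separator(separator_line: str) -> list:
--     """Single forward pass: a position starts a new column exactly when it is a
--     non-space character whose nearest preceding non-space character is '-' and
--     which does not sit inside a dash run."""
--     columns = [0]
--     last = None   # last non-space character seen so far
--     prev = None   # previous character
--     for j, ch in enumerate(separator_line):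
--         if ch != ' ':
--             if last == '-' and not (ch == '-' and prev == '-'):
--                 columns.append(j)
--             last = ch
--         prev = ch
--     return columns
-- ===== Notes on version B (the rewrite author's own statement) =====
-- stated objective: simpler
-- what changed: Replaces A's outer scan with nested dash-skip and space-skip inner while loops by a single forward pass over enumerate that carries the last non-space character and the previous character and appends an index exactly when it follows a dash segment (plus optional spaces) without being inside a dash run.
import Mathlib
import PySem

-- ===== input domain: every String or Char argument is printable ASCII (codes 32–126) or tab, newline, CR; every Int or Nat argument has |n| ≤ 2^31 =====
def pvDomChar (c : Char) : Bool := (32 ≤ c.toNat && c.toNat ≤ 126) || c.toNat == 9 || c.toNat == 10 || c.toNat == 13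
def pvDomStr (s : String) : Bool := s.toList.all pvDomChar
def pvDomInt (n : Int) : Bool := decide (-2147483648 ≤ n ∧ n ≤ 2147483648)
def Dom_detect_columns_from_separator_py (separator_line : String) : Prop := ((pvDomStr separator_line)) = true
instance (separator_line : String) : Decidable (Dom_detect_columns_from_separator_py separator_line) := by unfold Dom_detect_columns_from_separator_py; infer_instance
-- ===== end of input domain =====

-- B replaces A's nested skip-loops by a single forward pass carrying the last
-- non-space character and the previous character (objective: simpler one-pass
-- state machine, same cost).

-- ===== PORT A =====
-- inner 'while i < len and s[i] == ch: i += 1' loops of A (dash skip and space skip)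
def pvSkip (cs : List Char) (ch : Char) (i : Nat) : Nat :=
  if h : i < cs.length then
    if cs[i] = ch then pvSkip cs ch (i + 1) else i
  else i
termination_by cs.length - i

-- termination facts for the outer while loop (cited by decreasing_by)
theorem le_pvSkip (cs : List Char) (ch : Char) (i : Nat) : i ≤ pvSkip cs ch i := by
  fun_induction pvSkip cs ch i with
  | case1 i h hc ih => omega
  | case2 i h hc => omega
  | case3 i h => omega

theorem lt_pvSkip_of_eq (cs : List Char) (i : Nat) (h : i < cs.length) (hc : cs[i] = '-') :
    i < pvSkip cs '-' i := by
  rw [pvSkip]; simp only [h, hc, dif_pos, if_pos]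
  exact Nat.lt_of_lt_of_le (Nat.lt_succ_self i) (le_pvSkip cs '-' (i + 1))

-- A's outer while loop
def pvALoop (cs : List Char) (i : Nat) (acc : List Int) : List Int :=
  if h : i < cs.length then
    if cs[i] = '-' then
      let i2 := pvSkip cs ' ' (pvSkip cs '-' i)
      if i2 < cs.length then pvALoop cs i2 (acc ++ [(i2 : Int)]) else acc
    else pvALoop cs (i + 1) acc
  else acc
termination_by cs.length - i
decreasing_by
  · have h1 := lt_pvSkip_of_eq cs i h (by assumption)
    have h2 := le_pvSkip cs ' ' (pvSkip cs '-' i)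
    omega
  · omega

def detect_columns_from_separator_py (separator_line : String) : List Int :=
  pvALoop separator_line.toList 0 [0]

-- ===== PORT B =====
-- one step of B's 'for j, ch in enumerate(separator_line)' loop;
-- state = (columns, last non-space char or none, previous char or none)
def pvBStep (st : List Int × Option Char × Option Char) (p : Int × Char) :
    List Int × Option Char × Option Char :=
  let cols := st.1; let last := st.2.1; let prev := st.2.2
  let j := p.1; let ch := p.2
  if ch ≠ ' ' then
    ((if last = some '-' ∧ ¬(ch = '-' ∧ prev = some '-') then cols ++ [j] else cols),
     some ch, some ch)
  else (cols, last, some ch)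

def detect_columns_from_separator_py_alt (separator_line : String) : List Int :=
  ((PySem.List.enumerate separator_line.toList 0).foldl pvBStep ([0], none, none)).1

-- ===== PRECONDITION & SPEC =====
def Spec_detect_columns_from_separator_py (separator_line : String) (out : List Int) : Prop := out = detect_columns_from_separator_py_alt separator_line
instance (separator_line : String) (out : List Int) : Decidable (Spec_detect_columns_from_separator_py separator_line out) := by unfold Spec_detect_columns_from_separator_py; infer_instance

-- ===== CLAIM (what is proved, stated in full; the proofs are below) =====
def Claim_equal_detect_columns_from_separator_py : Prop := ∀ (separator_line : String), Dom_detect_columns_from_separator_py separator_line → Spec_detect_columns_from_separator_py separator_line (detect_columns_from_separator_py separator_line)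

-- ===== LEMMAS AND PROOFS =====

-- last non-space character of a list (none if there is none)
def lastNS (l : List Char) : Option Char :=
  l.foldl (fun a c => if c = ' ' then a else some c) none

-- the common characterization: position j starts a new column
def colC (cs : List Char) (j : Nat) : Bool :=
  match cs[j]? with
  | none => false
  | some c => decide (c ≠ ' ' ∧ lastNS (cs.take j) = some '-' ∧
      ¬(c = '-' ∧ (cs.take j).getLast? = some '-'))

def colIdx (cs : List Char) (j : Nat) : List Int :=
  ((List.range' j (cs.length - j)).filter (colC cs)).map (fun n => (n : Int))

theorem colC_eq_of_lt (cs : List Char) (j : Nat) (h : j < cs.length) :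
    colC cs j = decide (cs[j] ≠ ' ' ∧ lastNS (cs.take j) = some '-' ∧
      ¬(cs[j] = '-' ∧ (cs.take j).getLast? = some '-')) := by
  simp [colC, List.getElem?_eq_getElem h]

theorem lastNS_append_single (l : List Char) (c : Char) :
    lastNS (l ++ [c]) = if c = ' ' then lastNS l else some c := by
  simp [lastNS, List.foldl_append]

theorem take_succ_of_lt (cs : List Char) (j : Nat) (h : j < cs.length) :
    cs.take (j + 1) = cs.take j ++ [cs[j]] := by
  rw [List.take_add_one, List.getElem?_eq_getElem h]
  rfl

theorem lastNS_take_succ (cs : List Char) (j : Nat) (h : j < cs.length) :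
    lastNS (cs.take (j + 1)) = if cs[j] = ' ' then lastNS (cs.take j) else some cs[j] := by
  rw [take_succ_of_lt cs j h, lastNS_append_single]

theorem getLast?_take_succ (cs : List Char) (j : Nat) (h : j < cs.length) :
    (cs.take (j + 1)).getLast? = some cs[j] := by
  rw [take_succ_of_lt cs j h, List.getLast?_concat]

-- lastNS is unchanged across a block of spaces
theorem lastNS_take_of_spaces (cs : List Char) (a : Nat) :
    ∀ b, a ≤ b → b ≤ cs.length → (∀ j, a ≤ j → j < b → cs[j]? = some ' ') →
    lastNS (cs.take b) = lastNS (cs.take a) := by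
  intro b
  induction b with
  | zero => intro hab _ _; have : a = 0 := Nat.le_zero.mp hab; simp [this]
  | succ n ih =>
    intro hab hbl hsp
    rcases Nat.lt_or_ge a (n + 1) with hlt | hge
    · have han : a ≤ n := Nat.lt_succ_iff.mp hlt
      have hn : n < cs.length := Nat.lt_of_lt_of_le (Nat.lt_succ_self n) hbl
      have hc : cs[n] = ' ' := by
        have := hsp n han (Nat.lt_succ_self n)
        simpa [List.getElem?_eq_getElem hn] using this
      rw [lastNS_take_succ cs n hn, if_pos hc]
      exact ih han (Nat.le_of_lt hn) (fun j hj1 hj2 => hsp j hj1 (Nat.lt_succ_of_lt hj2))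
    · have : a = n + 1 := Nat.le_antisymm hab hge
      simp [this]

theorem pvSkip_le_length (cs : List Char) (ch : Char) (i : Nat) :
    i ≤ cs.length → pvSkip cs ch i ≤ cs.length := by
  fun_induction pvSkip cs ch i with
  | case1 i h _hc ih => intro _; exact ih (by omega)
  | case2 i h hc => intro hi; exact hi
  | case3 i h => intro hi; exact hi

theorem pvSkip_mem (cs : List Char) (ch : Char) (i : Nat) :
    ∀ j, i ≤ j → j < pvSkip cs ch i → cs[j]? = some ch := by
  fun_induction pvSkip cs ch i with
  | case1 i h hc ih =>
    intro j hj1 hj2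
    rcases Nat.lt_or_ge j (i + 1) with hji | hji
    · have : j = i := by omega
      subst this; simp [List.getElem?_eq_getElem h, hc]
    · exact ih j hji hj2
  | case2 i h hc => intro j hj1 hj2; omega
  | case3 i h => intro j hj1 hj2; omega

theorem pvSkip_stop (cs : List Char) (ch : Char) (i : Nat) :
    pvSkip cs ch i < cs.length → cs[pvSkip cs ch i]? ≠ some ch := by
  fun_induction pvSkip cs ch i with
  | case1 i h hc ih => exact ih
  | case2 i h hc => intro _; simp [List.getElem?_eq_getElem h, hc]
  | case3 i h => intro hl; omega

-- colC is false strictly inside a dash run and on the spaces after it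
theorem colC_interior_false (cs : List Char) (i i1 i2 : Nat) (h : i < cs.length)
    (hc : cs[i] = '-') (hi1 : i1 = pvSkip cs '-' i) (hi2 : i2 = pvSkip cs ' ' i1) :
    ∀ j, i < j → j < i2 → colC cs j = false := by
  intro j hj1 hj2
  have hi1len : i1 ≤ cs.length := hi1 ▸ pvSkip_le_length cs '-' i (Nat.le_of_lt h)
  have hi2len : i2 ≤ cs.length := hi2 ▸ pvSkip_le_length cs ' ' i1 hi1len
  have hjlen : j < cs.length := Nat.lt_of_lt_of_le hj2 hi2len
  rcases Nat.lt_or_ge j i1 with hji1 | hji1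
  · -- inside the dash run: cs[j] = '-' and cs[j-1] = '-'
    have hcj : cs[j] = '-' := by
      have := pvSkip_mem cs '-' i j (Nat.le_of_lt hj1) (hi1 ▸ hji1)
      simpa [List.getElem?_eq_getElem hjlen] using this
    have hj1len : j - 1 < cs.length := by omega
    have hcjm : cs[j-1] = '-' := by
      have := pvSkip_mem cs '-' i (j - 1) (by omega) (by rw [← hi1]; omega)
      simpa [List.getElem?_eq_getElem hj1len] using this
    have hgl : (cs.take j).getLast? = some '-' := by
      have hj' : j - 1 + 1 = j := by omega
      have := getLast?_take_succ cs (j - 1) hj1len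
      rw [hj'] at this; rw [this, hcjm]
    rw [colC_eq_of_lt cs j hjlen]
    simp [hcj, hgl]
  · -- in the space block
    have hcj : cs[j] = ' ' := by
      have := pvSkip_mem cs ' ' i1 j hji1 (hi2 ▸ hj2)
      simpa [List.getElem?_eq_getElem hjlen] using this
    rw [colC_eq_of_lt cs j hjlen]
    simp [hcj]

-- colC is true at the position A appends
theorem colC_at_i2 (cs : List Char) (i i1 i2 : Nat) (h : i < cs.length) (hc : cs[i] = '-')
    (hi1 : i1 = pvSkip cs '-' i) (hi2 : i2 = pvSkip cs ' ' i1) (h2 : i2 < cs.length) :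
    colC cs i2 = true := by
  have hii1 : i < i1 := hi1 ▸ lt_pvSkip_of_eq cs i h hc
  have hi1i2 : i1 ≤ i2 := hi2 ▸ le_pvSkip cs ' ' i1
  have hi1len : i1 ≤ cs.length := hi1 ▸ pvSkip_le_length cs '-' i (Nat.le_of_lt h)
  have hns : cs[i2] ≠ ' ' := by
    intro hsp
    exact (hi2 ▸ pvSkip_stop cs ' ' i1) (hi2 ▸ h2) (by rw [List.getElem?_eq_getElem h2, hsp])
  -- lastNS (take i1) = some '-'
  have hlast1 : lastNS (cs.take i1) = some '-' := by
    have hm1 : i1 - 1 < cs.length := by omega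
    have hcm : cs[i1-1] = '-' := by
      have := pvSkip_mem cs '-' i (i1 - 1) (by omega) (by rw [← hi1]; omega)
      simpa [List.getElem?_eq_getElem hm1] using this
    have h' : i1 - 1 + 1 = i1 := by omega
    have := lastNS_take_succ cs (i1 - 1) hm1
    rw [h'] at this; rw [this, hcm]; simp
  have hlast : lastNS (cs.take i2) = some '-' := by
    rw [lastNS_take_of_spaces cs i1 i2 hi1i2 (Nat.le_of_lt h2)
      (fun j hj1 hj2 => pvSkip_mem cs ' ' i1 j hj1 (hi2 ▸ hj2))]
    exact hlast1
  -- third conjunct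
  have hthird : ¬(cs[i2] = '-' ∧ (cs.take i2).getLast? = some '-') := by
    rcases Nat.lt_or_ge i1 i2 with hlt | hge
    · -- spaces skipped: previous char is ' '
      intro ⟨_, hgl⟩
      have hm : i2 - 1 < cs.length := by omega
      have hsp : cs[i2-1] = ' ' := by
        have := pvSkip_mem cs ' ' i1 (i2 - 1) (by omega) (by rw [← hi2]; omega)
        simpa [List.getElem?_eq_getElem hm] using this
      have h' : i2 - 1 + 1 = i2 := by omega
      have hg := getLast?_take_succ cs (i2 - 1) hm
      rw [h'] at hg; rw [hg, hsp] at hgl; simp at hgl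
    · -- no spaces skipped: i2 = i1 and cs[i2] ≠ '-'
      have heq : i2 = i1 := by omega
      intro ⟨hd, _⟩
      have hd? : cs[i2]? = some '-' := by
        rw [List.getElem?_eq_getElem h2, hd]
      have hlen : pvSkip cs '-' i < cs.length := by rw [← hi1]; omega
      rw [heq, hi1] at hd?
      exact pvSkip_stop cs '-' i hlen hd?
  rw [colC_eq_of_lt cs i2 h2]
  simp [hns, hlast, hthird]

-- colC is false at i+1 when cs[i] ≠ '-' (under the head invariant)
theorem colC_succ_false (cs : List Char) (i : Nat) (h : i < cs.length) (hc : cs[i] ≠ '-')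
    (hinv : cs[i] = ' ' → lastNS (cs.take i) ≠ some '-')
    (h1 : i + 1 < cs.length) : colC cs (i + 1) = false := by
  have hlast : lastNS (cs.take (i + 1)) ≠ some '-' := by
    rw [lastNS_take_succ cs i h]
    by_cases hsp : cs[i] = ' '
    · rw [if_pos hsp]; exact hinv hsp
    · rw [if_neg hsp]; simpa using hc
  rw [colC_eq_of_lt cs (i + 1) h1]
  simp [hlast]

theorem colIdx_nil (cs : List Char) (j : Nat) (h : cs.length ≤ j) : colIdx cs j = [] := by
  have : cs.length - j = 0 := by omega
  simp [colIdx, this]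

theorem colIdx_cons (cs : List Char) (j : Nat) (h : j < cs.length) :
    colIdx cs j = (if colC cs j then [(j : Int)] else []) ++ colIdx cs (j + 1) := by
  have hr : List.range' j (cs.length - j) = j :: List.range' (j + 1) (cs.length - (j + 1)) := by
    have : cs.length - j = (cs.length - (j + 1)) + 1 := by omega
    rw [this, List.range'_succ]
  rw [colIdx, hr, List.filter_cons]
  by_cases hcj : colC cs j
  · simp [hcj, colIdx]
  · simp [hcj, colIdx]

theorem colIdx_skip_false (cs : List Char) (a : Nat) :
    ∀ b, a ≤ b → (∀ j, a ≤ j → j < b → colC cs j = false) → colIdx cs a = colIdx cs b := by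
  intro b
  induction b with
  | zero => intro hab _; have : a = 0 := Nat.le_zero.mp hab; simp [this]
  | succ n ih =>
    intro hab hf
    rcases Nat.lt_or_ge a (n + 1) with hlt | hge
    · have han : a ≤ n := Nat.lt_succ_iff.mp hlt
      rw [ih han (fun j h1 h2 => hf j h1 (Nat.lt_succ_of_lt h2))]
      rcases Nat.lt_or_ge n cs.length with hn | hn
      · rw [colIdx_cons cs n hn, hf n han (Nat.lt_succ_self n)]; simp
      · rw [colIdx_nil cs n hn, colIdx_nil cs (n + 1) (by omega)]
    · have : a = n + 1 := Nat.le_antisymm hab hge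
      simp [this]

-- the main invariant for A's outer loop
theorem pvALoop_eq (cs : List Char) (i : Nat) (acc : List Int) :
    (∀ _ : i < cs.length, cs[i] = ' ' → lastNS (cs.take i) ≠ some '-') →
    pvALoop cs i acc = acc ++ colIdx cs (i + 1) := by
  fun_induction pvALoop cs i acc with
  | case1 i acc h hc i2 h2 ih =>
    -- dash branch, appends i2
    intro hinv
    have hdef : i2 = pvSkip cs ' ' (pvSkip cs '-' i) := rfl
    have hi2 : i < i2 := by
      have h1 := lt_pvSkip_of_eq cs i h hc
      have h2' := le_pvSkip cs ' ' (pvSkip cs '-' i)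
      omega
    have hinv2 : ∀ _ : i2 < cs.length, cs[i2] = ' ' → lastNS (cs.take i2) ≠ some '-' := by
      intro hh hsp
      exact absurd (by rw [List.getElem?_eq_getElem hh, hsp] :
          cs[i2]? = some ' ')
        (by rw [hdef] at hh ⊢; exact pvSkip_stop cs ' ' (pvSkip cs '-' i) hh)
    rw [ih hinv2]
    rw [colIdx_skip_false cs (i + 1) i2 hi2
      (fun j hj1 hj2 => colC_interior_false cs i (pvSkip cs '-' i) i2 h hc rfl hdef j (by omega) hj2)]
    rw [colIdx_cons cs i2 h2, colC_at_i2 cs i (pvSkip cs '-' i) i2 h hc rfl hdef h2]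
    simp
  | case2 i acc h hc i2 h2 =>
    intro hinv
    have hdef : i2 = pvSkip cs ' ' (pvSkip cs '-' i) := rfl
    have : colIdx cs (i + 1) = [] := by
      rcases Nat.lt_or_ge (i + 1) cs.length with hl | hl
      · rw [colIdx_skip_false cs (i + 1) i2 (by
            have := lt_pvSkip_of_eq cs i h hc
            have := le_pvSkip cs ' ' (pvSkip cs '-' i); omega)
          (fun j hj1 hj2 => colC_interior_false cs i (pvSkip cs '-' i) i2 h hc rfl hdef j (by omega) hj2)]
        exact colIdx_nil cs i2 (by omega)
      · exact colIdx_nil cs (i + 1) hl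
    rw [this]; simp
  | case3 i acc h hc ih =>
    intro hinv
    have hinv2 : ∀ _ : i + 1 < cs.length, cs[i+1] = ' ' → lastNS (cs.take (i+1)) ≠ some '-' := by
      intro hh _
      rw [lastNS_take_succ cs i h]
      by_cases hsp : cs[i] = ' '
      · rw [if_pos hsp]; exact hinv h hsp
      · rw [if_neg hsp]; simpa using hc
    rw [ih hinv2]
    congr 1
    rcases Nat.lt_or_ge (i + 1) cs.length with hl | hl
    · rw [colIdx_cons cs (i + 1) hl, colC_succ_false cs i h hc (hinv h) hl]; simp
    · rw [colIdx_nil cs (i + 1) hl, colIdx_nil cs (i + 2) (by omega)]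
  | case4 i acc h =>
    intro _
    rw [colIdx_nil cs (i + 1) (by omega)]; simp

-- B's loop as a structural recursion on the remaining characters
def bRun (l : List Char) (s : Int) (last prev : Option Char) : List Int :=
  match l with
  | [] => []
  | c :: t =>
    if c ≠ ' ' then
      (if last = some '-' ∧ ¬(c = '-' ∧ prev = some '-') then [s] else []) ++
        bRun t (s + 1) (some c) (some c)
    else bRun t (s + 1) last (some c)

theorem foldB_eq (l : List Char) : ∀ (s : Int) cols last prev,
    ((PySem.List.enumerate l s).foldl pvBStep (cols, last, prev)).1 =
      cols ++ bRun l s last prev := by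
  induction l with
  | nil => intro s cols last prev; simp [PySem.List.enumerate_nil, bRun]
  | cons c t ih =>
    intro s cols last prev
    rw [PySem.List.enumerate_cons, List.foldl_cons, bRun]
    by_cases hsp : c = ' '
    · subst hsp
      simp only [pvBStep, ne_eq, not_true_eq_false, ite_false]
      rw [ih]
    · simp only [pvBStep, ne_eq, hsp, not_false_eq_true, if_pos]
      by_cases hcond : last = some '-' ∧ ¬(c = '-' ∧ prev = some '-')
      · simp only [if_pos hcond]; rw [ih]; simp
      · simp only [if_neg hcond]; rw [ih]; simp

theorem bRun_eq (cs : List Char) : ∀ n j, n = cs.length - j → j ≤ cs.length →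
    bRun (cs.drop j) (j : Int) (lastNS (cs.take j)) ((cs.take j).getLast?) = colIdx cs j := by
  intro n
  induction n with
  | zero =>
    intro j hn hj
    have : j = cs.length := by omega
    subst this
    simp [bRun, colIdx_nil cs cs.length (Nat.le_refl _)]
  | succ m ih =>
    intro j hn hj
    have hjl : j < cs.length := by omega
    have hdrop : cs.drop j = cs[j] :: cs.drop (j + 1) := List.drop_eq_getElem_cons hjl
    rw [hdrop, bRun]
    have hcast : (j : Int) + 1 = ((j + 1 : Nat) : Int) := by push_cast; ring
    rw [colIdx_cons cs j hjl]
    by_cases hsp : cs[j] = ' '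
    · rw [if_neg (by simpa using hsp)]
      have hlast : lastNS (cs.take (j + 1)) = lastNS (cs.take j) := by
        rw [lastNS_take_succ cs j hjl, if_pos hsp]
      have hprev : (cs.take (j + 1)).getLast? = some cs[j] := getLast?_take_succ cs j hjl
      have hcol : colC cs j = false := by
        rw [colC_eq_of_lt cs j hjl]; simp [hsp]
      have hrec : bRun (cs.drop (j + 1)) ((j : Int) + 1) (lastNS (cs.take j)) (some cs[j]) =
          colIdx cs (j + 1) := by
        rw [hcast, ← hlast, ← hprev]
        exact ih (j + 1) (by omega) (by omega)
      rw [hcol, hrec]; simp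
    · rw [if_pos (by simpa using hsp)]
      have hlast : lastNS (cs.take (j + 1)) = some cs[j] := by
        rw [lastNS_take_succ cs j hjl, if_neg hsp]
      have hprev : (cs.take (j + 1)).getLast? = some cs[j] := getLast?_take_succ cs j hjl
      have hrec : bRun (cs.drop (j + 1)) ((j : Int) + 1) (some cs[j]) (some cs[j]) =
          colIdx cs (j + 1) := by
        have hih := ih (j + 1) (by omega) (by omega)
        rw [hlast, hprev] at hih
        rw [hcast]; exact hih
      have hcol : colC cs j =
          decide (lastNS (cs.take j) = some '-' ∧
            ¬(cs[j] = '-' ∧ (cs.take j).getLast? = some '-')) := by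
        rw [colC_eq_of_lt cs j hjl]; simp [hsp]
      rw [hrec, hcol]
      by_cases hcond : lastNS (cs.take j) = some '-' ∧
          ¬(cs[j] = '-' ∧ (cs.take j).getLast? = some '-')
      · rw [if_pos hcond, decide_eq_true hcond]; simp
      · rw [if_neg hcond]
        have hd : decide (lastNS (cs.take j) = some '-' ∧
            ¬(cs[j] = '-' ∧ (cs.take j).getLast? = some '-')) = false := by
          simpa using hcond
        rw [hd]; simp

theorem colIdx_zero_eq_one (cs : List Char) : colIdx cs 0 = colIdx cs 1 := by
  rcases Nat.eq_zero_or_pos cs.length with h0 | hpos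
  · rw [colIdx_nil cs 0 (by omega), colIdx_nil cs 1 (by omega)]
  · rw [colIdx_cons cs 0 hpos]
    have : colC cs 0 = false := by
      rw [colC_eq_of_lt cs 0 hpos]; simp [lastNS]
    rw [this]; simp

-- ===== VERDICT (by name: the statement is the Claim_ definition above) =====
theorem detect_columns_from_separator_py_spec : Claim_equal_detect_columns_from_separator_py := by
  intro s _
  unfold Spec_detect_columns_from_separator_py
  unfold detect_columns_from_separator_py detect_columns_from_separator_py_alt
  rw [foldB_eq s.toList 0 [0] none none]
  have hB : bRun s.toList (0 : Int) none none = colIdx s.toList 0 := by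
    have := bRun_eq s.toList (s.toList.length - 0) 0 rfl (Nat.zero_le _)
    simpa [lastNS] using this
  rw [hB, colIdx_zero_eq_one]
  rw [pvALoop_eq s.toList 0 [0] (by intro h _; simp [lastNS])]
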